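-- pv_equiv track=rewrite | github.com/nishaids/nish-lifeos-agent | tools/pdf_tools.py | _parse_content_sections
-- ===== SOURCE A (Python) =====
-- def _parse_content_sections(content: str) -> list:
--     """
--     Parse report content into sections.
--     Looks for markdown-style headers (## or **Header**) and splits accordingly.
--
--     Returns:
--         List of (title, body) tuples.
--     """
--     lines = content.strip().split("\n")
--     sections = []
--     current_title = "Executive Summary"
--     current_body = []
--
--     for line in lines:
--         stripped = line.strip()
--
--         # Check for markdown headers
--         if stripped.startswith("## "):
--             if current_body:
--                 sections.append((current_title, "\n".join(current_body)))
--             current_title = stripped.lstrip("# ").strip()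
--             current_body = []
--         elif stripped.startswith("# "):
--             if current_body:
--                 sections.append((current_title, "\n".join(current_body)))
--             current_title = stripped.lstrip("# ").strip()
--             current_body = []
--         elif stripped.startswith("**") and stripped.endswith("**") and len(stripped) > 4:
--             if current_body:
--                 sections.append((current_title, "\n".join(current_body)))
--             current_title = stripped.strip("*").strip()
--             current_body = []
--         else:
--             current_body.append(line)
--
--     # Add the last section
--     if current_body:
--         sections.append((current_title, "\n".join(current_body)))
--
--     # If no sections were found, create a default one
--     if not sections:
--         sections = [("Report Content", content)]
--
--     return sections
-- ===== SOURCE B (Python) =====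
-- def _header_title(line):
--     s = line.strip()
--     if s.startswith("## ") or s.startswith("# "):
--         return s.lstrip("# ").strip()
--     if s.startswith("**") and s.endswith("**") and len(s) > 4:
--         return s.strip("*").strip()
--     return None
--
--
-- def _sections(title, lines):
--     # split off the run of non-header lines, then recurse on the rest
--     k = 0
--     while k < len(lines) and _header_title(lines[k]) is None:
--         k += 1
--     body, rest = lines[:k], lines[k:]
--     out = [(title, "\n".join(body))] if body else []
--     if rest:
--         out += _sections(_header_title(rest[0]), rest[1:])
--     return out
--
--
-- def _parse_content_sections(content: str) -> list:
--     lines = content.strip().split("\n")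
--     sections = _sections("Executive Summary", lines)
--     return sections if sections else [("Report Content", content)]
-- ===== Notes on version B (the rewrite author's own statement) =====
-- stated objective: alternative
-- what changed: Replaces A's single stateful accumulator loop (current_title/current_body/sections mutated per line) with a line classifier plus a recursive span-splitter: each step takes the run of non-header lines as a slice, emits one section, and recurses on the remainder after the next header.
import Mathlib
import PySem

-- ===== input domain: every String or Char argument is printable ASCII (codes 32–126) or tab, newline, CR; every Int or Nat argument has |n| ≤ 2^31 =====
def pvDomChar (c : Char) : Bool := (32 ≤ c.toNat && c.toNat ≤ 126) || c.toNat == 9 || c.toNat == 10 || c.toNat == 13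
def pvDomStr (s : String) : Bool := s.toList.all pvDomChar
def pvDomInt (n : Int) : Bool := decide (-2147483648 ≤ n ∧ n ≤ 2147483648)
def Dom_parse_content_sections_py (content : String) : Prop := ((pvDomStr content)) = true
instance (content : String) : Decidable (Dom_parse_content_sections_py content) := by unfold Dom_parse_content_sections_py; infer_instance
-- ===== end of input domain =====

-- B rewrites A's single stateful accumulator loop as a classifier + recursive span-splitter; same cost, alternative decomposition.

-- ===== PORT A =====
-- hand port of Python's s.lstrip("# "): drop leading chars that are '#' or ' ' (exact: lstrip(chars) drops while the char is in chars)
def pvLstripHashSpace (s : String) : String :=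
  String.ofList (s.toList.dropWhile (fun c => c == '#' || c == ' '))

-- one iteration of A's for-loop over (sections, current_title, current_body)
def pvStepA (st : List (String × String) × String × List String) (line : String) :
    List (String × String) × String × List String :=
  let stripped := PySem.Str.strip line
  if PySem.Str.startswith stripped "## " then
    ((if st.2.2 = [] then st.1 else st.1 ++ [(st.2.1, PySem.Str.join "\n" st.2.2)]),
     PySem.Str.strip (pvLstripHashSpace stripped), [])
  else if PySem.Str.startswith stripped "# " then
    ((if st.2.2 = [] then st.1 else st.1 ++ [(st.2.1, PySem.Str.join "\n" st.2.2)]),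
     PySem.Str.strip (pvLstripHashSpace stripped), [])
  else if PySem.Str.startswith stripped "**" && PySem.Str.endswith stripped "**"
          && decide (4 < PySem.Str.len stripped) then
    ((if st.2.2 = [] then st.1 else st.1 ++ [(st.2.1, PySem.Str.join "\n" st.2.2)]),
     PySem.Str.strip (PySem.Str.stripChars stripped "*"), [])
  else
    (st.1, st.2.1, st.2.2 ++ [line])

def parse_content_sections_py (content : String) : List (String × String) :=
  let lines := (PySem.Str.split? (PySem.Str.strip content) "\n").getD []
  let st := lines.foldl pvStepA ([], "Executive Summary", [])
  let sections := if st.2.2 = [] then st.1 else st.1 ++ [(st.2.1, PySem.Str.join "\n" st.2.2)]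
  if sections = [] then [("Report Content", content)] else sections

-- ===== PORT B =====
-- Source B's classifier: the title a line declares, or none for a body line
def pvHeaderTitle (line : String) : Option String :=
  let s := PySem.Str.strip line
  if PySem.Str.startswith s "## " || PySem.Str.startswith s "# " then
    some (PySem.Str.strip (pvLstripHashSpace s))
  else if PySem.Str.startswith s "**" && PySem.Str.endswith s "**"
          && decide (4 < PySem.Str.len s) then
    some (PySem.Str.strip (PySem.Str.stripChars s "*"))
  else none

def pvNotHeader (l : String) : Bool := (pvHeaderTitle l).isNone

-- Source B's _sections: split off the run of non-header lines (the while loop + slices), recurse on the rest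
def pvSections (title : String) (lines : List String) : List (String × String) :=
  (if lines.takeWhile pvNotHeader = [] then []
   else [(title, PySem.Str.join "\n" (lines.takeWhile pvNotHeader))]) ++
  (match h : lines.dropWhile pvNotHeader with
   | [] => []
   | r0 :: rtl => pvSections ((pvHeaderTitle r0).getD "") rtl)
termination_by lines.length
decreasing_by
  have hle := List.length_dropWhile_le pvNotHeader lines
  simp [h] at hle
  omega

def parse_content_sections_py_alt (content : String) : List (String × String) :=
  let lines := (PySem.Str.split? (PySem.Str.strip content) "\n").getD []
  let sections := pvSections "Executive Summary" lines
  if sections = [] then [("Report Content", content)] else sections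

-- ===== PRECONDITION & SPEC =====
def Spec_parse_content_sections_py (content : String) (out : List (String × String)) : Prop := out = parse_content_sections_py_alt content
instance (content : String) (out : List (String × String)) : Decidable (Spec_parse_content_sections_py content out) := by unfold Spec_parse_content_sections_py; infer_instance

-- ===== CLAIM (what is proved, stated in full; the proofs are below) =====
def Claim_equal_parse_content_sections_py : Prop := ∀ (content : String), Dom_parse_content_sections_py content → Spec_parse_content_sections_py content (parse_content_sections_py content)

-- ===== LEMMAS AND PROOFS =====

-- flush A's pending body into its sections (the post-loop "add the last section")
def pvFinish (st : List (String × String) × String × List String) : List (String × String) :=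
  if st.2.2 = [] then st.1 else st.1 ++ [(st.2.1, PySem.Str.join "\n" st.2.2)]

theorem pvSections_unfold (title : String) (lines : List String) :
    pvSections title lines
      = (if lines.takeWhile pvNotHeader = [] then []
         else [(title, PySem.Str.join "\n" (lines.takeWhile pvNotHeader))])
        ++ (match lines.dropWhile pvNotHeader with
            | [] => []
            | r0 :: rtl => pvSections ((pvHeaderTitle r0).getD "") rtl) := by
  rw [pvSections.eq_def]
  cases hd : List.dropWhile pvNotHeader lines <;> simp

theorem pvStepA_of_header (st : List (String × String) × String × List String)
    (line t' : String) (h : pvHeaderTitle line = some t') :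
    pvStepA st line = (pvFinish st, t', []) := by
  unfold pvHeaderTitle at h
  unfold pvStepA pvFinish
  by_cases h1 : PySem.Str.startswith (PySem.Str.strip line) "## " = true <;>
  by_cases h2 : PySem.Str.startswith (PySem.Str.strip line) "# " = true <;>
  by_cases h3 : (PySem.Str.startswith (PySem.Str.strip line) "**"
      && PySem.Str.endswith (PySem.Str.strip line) "**"
      && decide (4 < PySem.Str.len (PySem.Str.strip line))) = true <;>
  simp_all

theorem pvStepA_of_body (st : List (String × String) × String × List String)
    (line : String) (h : pvHeaderTitle line = none) :
    pvStepA st line = (st.1, st.2.1, st.2.2 ++ [line]) := by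
  unfold pvHeaderTitle at h
  unfold pvStepA
  by_cases h1 : PySem.Str.startswith (PySem.Str.strip line) "## " = true <;>
  by_cases h2 : PySem.Str.startswith (PySem.Str.strip line) "# " = true <;>
  by_cases h3 : (PySem.Str.startswith (PySem.Str.strip line) "**"
      && PySem.Str.endswith (PySem.Str.strip line) "**"
      && decide (4 < PySem.Str.len (PySem.Str.strip line))) = true <;>
  simp_all

-- the loop invariant: A's flushed fold equals "emitted sections, plus the pending segment, plus B's recursion on the rest"
theorem pvLoop (lines : List String) :
    ∀ (sections : List (String × String)) (title : String) (body : List String),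
    pvFinish (lines.foldl pvStepA (sections, title, body))
      = sections
        ++ (if body ++ lines.takeWhile pvNotHeader = [] then []
            else [(title, PySem.Str.join "\n" (body ++ lines.takeWhile pvNotHeader))])
        ++ (match lines.dropWhile pvNotHeader with
            | [] => []
            | r0 :: rtl => pvSections ((pvHeaderTitle r0).getD "") rtl) := by
  induction lines with
  | nil =>
    intro sections title body
    by_cases hb : body = [] <;> simp [pvFinish, hb]
  | cons l ls ih =>
    intro sections title body
    cases hh : pvHeaderTitle l with
    | none =>
      have hn : pvNotHeader l = true := by simp [pvNotHeader, hh]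
      simp only [List.foldl_cons, pvStepA_of_body _ _ hh,
        List.takeWhile_cons, List.dropWhile_cons, hn, if_true]
      rw [ih sections title (body ++ [l])]
      simp
    | some t' =>
      have hn : pvNotHeader l = false := by simp [pvNotHeader, hh]
      simp only [List.foldl_cons, pvStepA_of_header _ _ _ hh]
      rw [ih (pvFinish (sections, title, body)) t' []]
      simp only [List.nil_append]
      rw [List.append_assoc, ← pvSections_unfold t' ls]
      by_cases hb : body = [] <;>
        simp [hb, hh, pvFinish, hn, List.append_assoc]

theorem pvSections_eq (lines : List String) (title : String) :
    pvSections title lines = pvFinish (lines.foldl pvStepA ([], title, [])) := by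
  rw [pvLoop lines [] title []]
  simp only [List.nil_append]
  rw [← pvSections_unfold title lines]

-- ===== VERDICT (by name: the statement is the Claim_ definition above) =====
theorem parse_content_sections_py_spec : Claim_equal_parse_content_sections_py := by
  intro content _
  simp only [Spec_parse_content_sections_py, parse_content_sections_py,
    parse_content_sections_py_alt, pvSections_eq, pvFinish]
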